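-- pv_equiv track=rewrite | github.com/atikulmunna/ubl-broad-detection | utils/retail_sam3_tuning.py | build_sam3_tuning_configs
-- ===== SOURCE A (Python) =====
-- import itertools
-- from typing import Dict, List
--
-- def build_sam3_tuning_configs(base_config: Dict, tuning_options: Dict[str, List]) -> List[Dict]:
--     keys = [key for key, values in tuning_options.items() if values]
--     if not keys:
--         return [dict(base_config)]
--
--     configs = []
--     value_lists = [tuning_options[key] for key in keys]
--     for values in itertools.product(*value_lists):
--         config = dict(base_config)
--         for key, value in zip(keys, values):
--             config[key] = value
--         configs.append(config)
--     return configs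
-- ===== SOURCE B (Python) =====
-- def build_sam3_tuning_configs(base_config, tuning_options):
--     result = [dict(base_config)]
--     for key, values in tuning_options.items():
--         if values:
--             result = [{**config, key: value} for config in result for value in values]
--     return result
-- ===== Notes on version B (the rewrite author's own statement) =====
-- stated objective: simpler
-- what changed: Replaces the itertools.product of pre-collected value lists plus a per-tuple zip/update loop by a single incremental fold: the config list is grown key by key, each step crossing the configs built so far with that key's values.
import Mathlib
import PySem

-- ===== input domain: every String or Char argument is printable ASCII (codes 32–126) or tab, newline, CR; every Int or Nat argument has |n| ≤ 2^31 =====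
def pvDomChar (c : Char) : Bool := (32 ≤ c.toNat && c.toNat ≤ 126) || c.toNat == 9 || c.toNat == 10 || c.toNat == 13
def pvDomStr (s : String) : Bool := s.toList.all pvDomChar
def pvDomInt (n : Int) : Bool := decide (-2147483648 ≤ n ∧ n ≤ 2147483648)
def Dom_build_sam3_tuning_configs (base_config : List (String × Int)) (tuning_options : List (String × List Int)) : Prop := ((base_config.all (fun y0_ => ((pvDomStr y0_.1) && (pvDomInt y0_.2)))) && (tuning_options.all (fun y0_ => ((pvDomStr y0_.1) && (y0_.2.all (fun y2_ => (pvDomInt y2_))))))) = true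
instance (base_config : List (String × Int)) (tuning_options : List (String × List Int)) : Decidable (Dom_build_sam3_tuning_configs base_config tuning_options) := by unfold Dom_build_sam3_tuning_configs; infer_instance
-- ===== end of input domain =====

-- B replaces itertools.product + per-tuple zip/update by one incremental fold over the active keys (simpler decomposition; same cost).


-- ===== PORT A =====
-- itertools.product(*lists): first list varies slowest
def pvProduct : List (List Int) → List (List Int)
  | [] => [[]]
  | l :: ls => l.flatMap (fun v => (pvProduct ls).map (fun t => v :: t))

def build_sam3_tuning_configs (base_config : List (String × Int)) (tuning_options : List (String × List Int)) : List (List (String × Int)) :=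
  -- the Python callee receives dicts; dict(...) construction = PySem.Dict.ofList
  let tdict : PySem.Dict String (List Int) := PySem.Dict.ofList tuning_options
  let bdict : PySem.Dict String Int := PySem.Dict.ofList base_config
  let keys : List String := (tdict.items.filter (fun p => !p.2.isEmpty)).map (·.1)
  if keys.isEmpty then [bdict.items]
  else
    -- tuning_options[key]: key stems from tdict.items, so the lookup always succeeds; getD [] is exact here
    let value_lists : List (List Int) := keys.map (fun k => tdict.getD k [])
    ((pvProduct value_lists).map (fun values =>
      ((keys.zip values).foldl (fun (d : PySem.Dict String Int) kv => d.insert kv.1 kv.2) bdict).items))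

-- ===== PORT B =====
def build_sam3_tuning_configs_alt (base_config : List (String × Int)) (tuning_options : List (String × List Int)) : List (List (String × Int)) :=
  let tdict : PySem.Dict String (List Int) := PySem.Dict.ofList tuning_options
  let init : List (PySem.Dict String Int) := [PySem.Dict.ofList base_config]
  (tdict.items.foldl (fun result p =>
      if !p.2.isEmpty then
        result.flatMap (fun config => p.2.map (fun v => config.insert p.1 v))
      else result) init).map (·.items)

-- ===== PRECONDITION & SPEC =====
def Spec_build_sam3_tuning_configs (base_config : List (String × Int)) (tuning_options : List (String × List Int)) (out : List (List (String × Int))) : Prop := out = build_sam3_tuning_configs_alt base_config tuning_options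
instance (base_config : List (String × Int)) (tuning_options : List (String × List Int)) (out : List (List (String × Int))) : Decidable (Spec_build_sam3_tuning_configs base_config tuning_options out) := by unfold Spec_build_sam3_tuning_configs; infer_instance

-- ===== CLAIM (what is proved, stated in full; the proofs are below) =====
def Claim_equal_build_sam3_tuning_configs : Prop := ∀ (base_config : List (String × Int)) (tuning_options : List (String × List Int)), Dom_build_sam3_tuning_configs base_config tuning_options → Spec_build_sam3_tuning_configs base_config tuning_options (build_sam3_tuning_configs base_config tuning_options)

-- ===== LEMMAS AND PROOFS =====

-- B's guarded fold over any pair list = flatMap of A's product/zip shape over the filtered pairs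
theorem fold_eq_product (ps : List (String × List Int)) (cfgs : List (PySem.Dict String Int)) :
    ps.foldl (fun result p =>
        if !p.2.isEmpty then
          result.flatMap (fun config => p.2.map (fun v => config.insert p.1 v))
        else result) cfgs
      = cfgs.flatMap (fun c =>
          (pvProduct ((ps.filter (fun p => !p.2.isEmpty)).map (·.2))).map (fun values =>
            (((ps.filter (fun p => !p.2.isEmpty)).map (·.1)).zip values).foldl
              (fun (d : PySem.Dict String Int) kv => d.insert kv.1 kv.2) c)) := by
  induction ps generalizing cfgs with
  | nil => simp [pvProduct]
  | cons p rest ih =>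
    rcases p with ⟨k, vs⟩
    cases vs with
    | nil => simpa using ih cfgs
    | cons v vt =>
      rw [List.foldl_cons]
      simp only [List.isEmpty_cons, Bool.not_false, if_true]
      rw [ih]
      simp [pvProduct, List.map_flatMap, List.flatMap_map, Function.comp_def,
        List.zip_cons_cons, List.foldl_cons, List.flatMap_assoc]

theorem getD_vals (tuning_options : List (String × List Int)) (p : String × List Int)
    (hp : p ∈ (PySem.Dict.ofList tuning_options).items.filter (fun q => !q.2.isEmpty)) :
    (PySem.Dict.ofList tuning_options).getD p.1 [] = p.2 := by
  have hm : (p.1, p.2) ∈ (PySem.Dict.ofList tuning_options).items := by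
    simpa using List.mem_of_mem_filter hp
  exact PySem.Dict.getD_of_mem_items _ hm (PySem.Dict.nodup_keys_ofList tuning_options) []

-- ===== VERDICT (by name: the statement is the Claim_ definition above) =====
theorem build_sam3_tuning_configs_spec : Claim_equal_build_sam3_tuning_configs := by
  intro base_config tuning_options _
  unfold Spec_build_sam3_tuning_configs build_sam3_tuning_configs build_sam3_tuning_configs_alt
  simp only [fold_eq_product]
  have hvl : ∀ active, active = (PySem.Dict.ofList tuning_options).items.filter (fun q => !q.2.isEmpty) →
      (active.map (·.1)).map (fun k => (PySem.Dict.ofList tuning_options).getD k []) = active.map (·.2) := by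
    intro active hact
    rw [List.map_map]
    exact List.map_congr_left (fun p hp => getD_vals tuning_options p (hact ▸ hp))
  cases hA : (PySem.Dict.ofList tuning_options).items.filter (fun q => !q.2.isEmpty) with
  | nil => simp [pvProduct]
  | cons q qs =>
    have h2 := hvl _ hA.symm
    simp [List.map_map, Function.comp, h2.symm]
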